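-- pv_equiv track=rewrite | github.com/zeeshan606115/Logical-coding-questions-for-Interview | elementOccurance.py | stringMapping
-- ===== SOURCE A (Python) =====
-- def stringMapping(s):
-- 	dict = {}
-- 	j = 0
-- 	l = []
--
-- 	for i in s:
-- 		if i not in dict:
-- 			dict[i] = j
-- 			l.append(dict[i])
-- 			j += 1
--
-- 		else:
-- 			dict[i] = dict.get(i)
-- 			l.append(dict[i])
--
-- 	return l
-- ===== SOURCE B (Python) =====
-- def stringMapping(s):
--     # rank of a character = number of distinct characters strictly before its first occurrence
--     return [len(set(s[:s.index(c)])) for c in s]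
-- ===== Notes on version B (the rewrite author's own statement) =====
-- stated objective: alternative
-- what changed: Instead of A's stateful scan that grows a dict and a counter in lockstep, B uses the closed characterization that a character's code equals the number of distinct characters strictly before its first occurrence, computing each output directly as len(set(s[:s.index(c)])) with no mapping or counter state at all.
import Mathlib
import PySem

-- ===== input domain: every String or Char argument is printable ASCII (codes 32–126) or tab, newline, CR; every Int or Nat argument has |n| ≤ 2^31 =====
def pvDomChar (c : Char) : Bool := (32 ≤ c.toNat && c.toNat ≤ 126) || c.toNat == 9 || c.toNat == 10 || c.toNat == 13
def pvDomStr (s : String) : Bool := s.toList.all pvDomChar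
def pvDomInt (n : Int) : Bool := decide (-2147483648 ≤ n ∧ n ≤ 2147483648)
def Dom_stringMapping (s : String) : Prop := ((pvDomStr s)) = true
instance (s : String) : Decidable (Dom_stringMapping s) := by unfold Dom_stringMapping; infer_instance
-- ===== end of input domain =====

-- B drops A's stateful scan (dict + counter grown in lockstep) and instead computes each
-- output directly: a character's code is the number of distinct characters strictly before
-- its first occurrence — len(set(s[:s.index(c)])) — a different, stateless algorithm.


-- ===== PORT A =====
-- the loop body of A, step for step: state (dict, j, l).  Inside the loop every key looked
-- up is present, so Python's dict.get(i) / dict[i] are ported exactly by getD with an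
-- (unreachable) default 0.
def stepA (st : PySem.Dict Char Int × Int × List Int) (i : Char) :
    PySem.Dict Char Int × Int × List Int :=
  let d := st.1
  let j := st.2.1
  let l := st.2.2
  if !(d.contains i) then
    let d' := d.insert i j
    (d', j + 1, l ++ [d'.getD i 0])
  else
    let d' := d.insert i (d.getD i 0)
    (d', j, l ++ [d'.getD i 0])

def stringMapping (s : String) : List Int :=
  (s.toList.foldl stepA ((PySem.Dict.empty : PySem.Dict Char Int), (0 : Int), ([] : List Int))).2.2

-- ===== PORT B =====
-- [len(set(s[:s.index(c)])) for c in s]: c is drawn from s, so s.index(c) never raises and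
-- equals List.idxOf (exact); the slice s[:k] with 0 ≤ k ≤ len(s) is List.take k (exact);
-- set(…) is PySem.Set.ofList; len is .length.
def stringMapping_alt (s : String) : List Int :=
  s.toList.map (fun c =>
    (((PySem.Set.ofList (s.toList.take (s.toList.idxOf c))).length : Nat) : Int))

-- ===== PRECONDITION & SPEC =====
def Spec_stringMapping (s : String) (out : List Int) : Prop := out = stringMapping_alt s
instance (s : String) (out : List Int) : Decidable (Spec_stringMapping s out) := by unfold Spec_stringMapping; infer_instance

-- ===== CLAIM (what is proved, stated in full; the proofs are below) =====
def Claim_equal_stringMapping : Prop := ∀ (s : String), Dom_stringMapping s → Spec_stringMapping s (stringMapping s)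

-- ===== LEMMAS AND PROOFS =====

-- the seen-set D grown by A's loop is a prefix of its final value
lemma update_prefix (D : List Char) (t : List Char) : D <+: PySem.Set.update D t := by
  induction t generalizing D with
  | nil => exact List.prefix_refl D
  | cons c t ih =>
    refine List.IsPrefix.trans ?_ (ih (PySem.Set.add D c))
    by_cases h : c ∈ D <;> simp [PySem.Set.add, h]

lemma idxOf_update (D t : List Char) (c : Char) (hc : c ∈ D) :
    (PySem.Set.update D t).idxOf c = D.idxOf c := by
  obtain ⟨E, hE⟩ := update_prefix D t
  rw [← hE, List.idxOf_append_of_mem hc]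

-- invariant of A's fold: the dict is the first-occurrence index table of the seen prefix D,
-- the counter is |D|, and the output grows by the index of each processed character.
lemma foldA_inv (t : List Char) :
    ∀ (D : List Char), D.Nodup →
    ∀ (d : PySem.Dict Char Int) (j : Int) (l : List Int), j = (D.length : Int) →
    (∀ c, d.get? c = if c ∈ D then some ((D.idxOf c : Nat) : Int) else none) →
    (t.foldl stepA (d, j, l)).2.2
      = l ++ t.map (fun c => (((PySem.Set.update D t).idxOf c : Nat) : Int)) := by
  induction t with
  | nil => intro D _ d j l _ _; simp [PySem.Set.update]
  | cons c t ih =>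
    intro D hD d j l hj hd
    have hcont : d.contains c = (d.get? c).isSome := PySem.Dict.contains_eq_isSome_get? d c
    by_cases hm : c ∈ D
    · -- repeated character: dict unchanged in value, append its first index
      have hv : d.get? c = some ((D.idxOf c : Nat) : Int) := by rw [hd c]; simp [hm]
      have hcon : d.contains c = true := by rw [hcont, hv]; rfl
      have hgetD : d.getD c 0 = ((D.idxOf c : Nat) : Int) := by
        simp [PySem.Dict.getD, hv]
      have hstep : stepA (d, j, l) c
          = (d.insert c (d.getD c 0), j, l ++ [(d.insert c (d.getD c 0)).getD c 0]) := by
        simp [stepA, hcon]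
      have hupd : PySem.Set.update D (c :: t) = PySem.Set.update D t := by
        simp [PySem.Set.update, PySem.Set.add, hm]
      have hd' : ∀ c', (d.insert c (d.getD c 0)).get? c'
          = if c' ∈ D then some ((D.idxOf c' : Nat) : Int) else none := by
        intro c'
        by_cases he : c' = c
        · subst he; rw [PySem.Dict.get?_insert_self, hgetD]; simp [hm]
        · rw [PySem.Dict.get?_insert_of_ne _ _ he, hd c']
      rw [List.foldl_cons, hstep, ih D hD _ _ _ hj hd']
      have hval : (d.insert c (d.getD c 0)).getD c 0 = ((D.idxOf c : Nat) : Int) := by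
        rw [PySem.Dict.getD_insert_self, hgetD]
      rw [hval]
      simp [hupd, idxOf_update D t c hm]
    · -- new character: assign the next index |D|
      have hv : d.get? c = none := by rw [hd c]; simp [hm]
      have hcon : d.contains c = false := by rw [hcont, hv]; rfl
      have hstep : stepA (d, j, l) c
          = (d.insert c j, j + 1, l ++ [(d.insert c j).getD c 0]) := by
        simp [stepA, hcon]
      have hD' : (D ++ [c]).Nodup := by
        simp [List.nodup_append, hD]
        exact fun a haD h => hm (h ▸ haD)
      have hidx : (D ++ [c]).idxOf c = D.length := by simp [List.idxOf_append, hm]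
      have hd' : ∀ c', (d.insert c j).get? c'
          = if c' ∈ (D ++ [c]) then some (((D ++ [c]).idxOf c' : Nat) : Int) else none := by
        intro c'
        by_cases he : c' = c
        · subst he
          rw [PySem.Dict.get?_insert_self]
          simp [hidx, hj]
        · rw [PySem.Dict.get?_insert_of_ne _ _ he, hd c']
          have hiff : c' ∈ D ++ [c] ↔ c' ∈ D := by simp [he]
          by_cases hm' : c' ∈ D
          · simp [hm', hiff.2 hm', List.idxOf_append_of_mem hm']
          · simp [hm', he]
      have hlen : j + 1 = ((D ++ [c]).length : Int) := by simp [hj]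
      rw [List.foldl_cons, hstep, ih (D ++ [c]) hD' _ _ _ hlen hd']
      have hupd : PySem.Set.update D (c :: t) = PySem.Set.update (D ++ [c]) t := by
        simp [PySem.Set.update, PySem.Set.add, hm]
      have hfirst : (d.insert c j).getD c 0 = ((D.length : Nat) : Int) := by
        rw [PySem.Dict.getD_insert_self, hj]
      simp [hupd, hfirst]
      rw [idxOf_update (D ++ [c]) t c (by simp), hidx]

-- Set.update distributes over list append
lemma update_append (D xs ys : List Char) :
    PySem.Set.update D (xs ++ ys) = PySem.Set.update (PySem.Set.update D xs) ys := by
  simp [PySem.Set.update, List.foldl_append]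

-- c does not occur strictly before its first occurrence
lemma not_mem_take_idxOf (l : List Char) (c : Char) : c ∉ l.take (l.idxOf c) := by
  intro h
  obtain ⟨i, hi, hget⟩ := List.mem_iff_getElem.1 h
  have hi' : i < l.idxOf c := lt_of_lt_of_le hi (by simp [List.length_take])
  have hlen : i < l.length := lt_of_lt_of_le hi' List.idxOf_le_length
  have hg : l[i] = c := by rw [← hget]; simp [List.getElem_take]
  have := List.not_of_lt_findIdx (p := (· == c)) (xs := l) (by simpa [List.idxOf] using hi')
  simp at this
  exact this hg

-- adding to a set: one step of update, and adding a fresh element appends it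
lemma update_cons (E : List Char) (c : Char) (R : List Char) :
    PySem.Set.update E (c :: R) = PySem.Set.update (PySem.Set.add E c) R := rfl

lemma add_not_mem (E : List Char) (c : Char) (h : c ∉ E) :
    PySem.Set.add E c = E ++ [c] := by simp [PySem.Set.add, h]

-- key characterization: the first-occurrence code of c in l equals the number of distinct
-- characters in the prefix of l strictly before c's first occurrence
lemma idxOf_update_eq_card_take (l : List Char) (c : Char) (hc : c ∈ l)
    (D : List Char) (hcD : c ∉ D) :
    (PySem.Set.update D l).idxOf c = (PySem.Set.update D (l.take (l.idxOf c))).length := by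
  have hk : l.idxOf c < l.length := List.idxOf_lt_length_of_mem hc
  have hsplit : l = l.take (l.idxOf c) ++ (c :: l.drop (l.idxOf c + 1)) := by
    conv_lhs => rw [← List.take_append_drop (l.idxOf c) l]
    rw [List.drop_eq_getElem_cons hk, List.getElem_idxOf]
  have hcE : c ∉ PySem.Set.update D (l.take (l.idxOf c)) := by
    intro h
    rcases (PySem.Set.mem_update _ _ _).1 h with h' | h'
    · exact hcD h'
    · exact not_mem_take_idxOf l c h'
  have h1 : PySem.Set.update D l
      = PySem.Set.update (PySem.Set.update D (l.take (l.idxOf c)) ++ [c])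
          (l.drop (l.idxOf c + 1)) := by
    conv_lhs => rw [hsplit]
    rw [update_append, update_cons, add_not_mem _ _ hcE]
  rw [h1, idxOf_update _ _ c (by simp), List.idxOf_append, if_neg hcE]
  simp

-- ===== VERDICT (by name: the statement is the Claim_ definition above) =====
theorem stringMapping_spec : Claim_equal_stringMapping := by
  intro s _
  show stringMapping s = stringMapping_alt s
  have hA := foldA_inv s.toList [] List.nodup_nil PySem.Dict.empty 0 [] (by simp)
    (by intro c; simp [PySem.Dict.get?_empty])
  simp only [stringMapping, stringMapping_alt, hA, List.nil_append]
  apply List.map_congr_left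
  intro c hc
  have h := idxOf_update_eq_card_take s.toList c hc [] (by simp)
  rw [h]
  simp [PySem.Set.ofList_eq_foldl, PySem.Set.update]
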